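-- pv_equiv track=rewrite | github.com/elevena11/Modular_Python_Framework | tools/compliance/core/scanner.py | _determine_section
-- ===== SOURCE A (Python) =====
-- def _determine_section(standard_id: str) -> str:
--     """
--     Determine which section a standard belongs to based on its ID.
--
--     Args:
--         standard_id: ID of the standard
--
--     Returns:
--         Section name
--     """
--     standard_id = standard_id.lower()
--
--     if any(keyword in standard_id for keyword in ["ui", "gradio", "streamlit", "component"]):
--         return "UI Standards"
--     elif any(keyword in standard_id for keyword in ["api", "endpoint", "validation", "schema"]):
--         return "API Standards"
--     elif any(keyword in standard_id for keyword in ["db", "database", "transaction", "migration"]):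
--         return "Database Standards"
--     elif any(keyword in standard_id for keyword in ["test", "doc", "documentation"]):
--         return "Testing & Documentation"
--     else:
--         return "Core Implementation Standards"
-- ===== SOURCE B (Python) =====
-- _KEYWORD_PRIORITY = {
--     "ui": 0, "gradio": 0, "streamlit": 0, "component": 0,
--     "api": 1, "endpoint": 1, "validation": 1, "schema": 1,
--     "db": 2, "database": 2, "transaction": 2, "migration": 2,
--     "test": 3, "doc": 3, "documentation": 3,
-- }
--
-- _SECTIONS = ["UI Standards", "API Standards", "Database Standards",
--              "Testing & Documentation", "Core Implementation Standards"]
--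
--
-- def _determine_section(standard_id: str) -> str:
--     sid = standard_id.lower()
--     best = 4
--     for i in range(len(sid)):
--         for kw, pri in _KEYWORD_PRIORITY.items():
--             if sid.startswith(kw, i):
--                 best = min(best, pri)
--     return _SECTIONS[best]
-- ===== Notes on version B (the rewrite author's own statement) =====
-- stated objective: alternative
-- what changed: Instead of a priority-ordered chain of substring-membership tests, B makes one scan over the string positions, using a keyword-to-priority map to take the minimum priority of any keyword starting at each position, and indexes a section table with that minimum.
import Mathlib
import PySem

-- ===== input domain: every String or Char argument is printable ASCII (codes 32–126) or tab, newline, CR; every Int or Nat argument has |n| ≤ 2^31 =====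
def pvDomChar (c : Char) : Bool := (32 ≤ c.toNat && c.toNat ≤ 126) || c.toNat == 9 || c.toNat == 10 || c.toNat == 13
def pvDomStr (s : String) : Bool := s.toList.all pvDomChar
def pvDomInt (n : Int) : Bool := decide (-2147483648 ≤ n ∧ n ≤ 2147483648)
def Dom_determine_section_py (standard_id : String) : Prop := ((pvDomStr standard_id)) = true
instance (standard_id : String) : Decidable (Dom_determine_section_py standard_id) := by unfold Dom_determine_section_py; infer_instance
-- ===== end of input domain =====

-- B replaces A's priority-ordered substring-membership chain by a single scan over string positions taking the minimum priority of any keyword starting there (alternative algorithm; similar cost).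


-- ===== PORT A =====
def determine_section_py (standard_id : String) : String :=
  let s := PySem.Str.lower standard_id
  if (["ui", "gradio", "streamlit", "component"].any (fun k => PySem.Str.isIn k s)) then
    "UI Standards"
  else if (["api", "endpoint", "validation", "schema"].any (fun k => PySem.Str.isIn k s)) then
    "API Standards"
  else if (["db", "database", "transaction", "migration"].any (fun k => PySem.Str.isIn k s)) then
    "Database Standards"
  else if (["test", "doc", "documentation"].any (fun k => PySem.Str.isIn k s)) then
    "Testing & Documentation"
  else
    "Core Implementation Standards"

-- ===== PORT B =====
-- _KEYWORD_PRIORITY dict (insertion order) and _SECTIONS list, as in Source B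
def pvKeywordPriority : List (String × Nat) :=
  [("ui", 0), ("gradio", 0), ("streamlit", 0), ("component", 0),
   ("api", 1), ("endpoint", 1), ("validation", 1), ("schema", 1),
   ("db", 2), ("database", 2), ("transaction", 2), ("migration", 2),
   ("test", 3), ("doc", 3), ("documentation", 3)]

def pvSections : List String :=
  ["UI Standards", "API Standards", "Database Standards",
   "Testing & Documentation", "Core Implementation Standards"]

-- sid.startswith(kw, i) for 0 ≤ i is exactly: kw.toList is a prefix of sid.drop i
def determine_section_py_alt (standard_id : String) : String :=
  let sid := (PySem.Str.lower standard_id).toList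
  let best :=
    (PySem.List.pyRange 0 (sid.length : Int) 1).foldl
      (fun best i =>
        pvKeywordPriority.foldl
          (fun b kp =>
            if PySem.Chars.startswith (sid.drop i.toNat) kp.1.toList then min b kp.2 else b)
          best)
      4
  -- _SECTIONS[best]: best is always in range (0..4), so list indexing never raises
  pvSections.getD best "Core Implementation Standards"

-- ===== PRECONDITION & SPEC =====
def Spec_determine_section_py (standard_id : String) (out : String) : Prop := out = determine_section_py_alt standard_id
instance (standard_id : String) (out : String) : Decidable (Spec_determine_section_py standard_id out) := by unfold Spec_determine_section_py; infer_instance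

-- ===== CLAIM (what is proved, stated in full; the proofs are below) =====
def Claim_equal_determine_section_py : Prop := ∀ (standard_id : String), Dom_determine_section_py standard_id → Spec_determine_section_py standard_id (determine_section_py standard_id)

-- ===== LEMMAS AND PROOFS =====

-- "some keyword of priority p occurs in sid"
def pvM (sid : List Char) (p : Nat) : Prop :=
  ∃ kp ∈ pvKeywordPriority, kp.2 = p ∧ ∃ i, kp.1.toList <+: sid.drop i

-- generic fold facts
theorem pv_foldl_le_init {α : Type} (g : Nat → α → Nat) (hg : ∀ b x, g b x ≤ b) :
    ∀ (L : List α) (b : Nat), List.foldl g b L ≤ b := by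
  intro L
  induction L with
  | nil => intro b; simp
  | cons x L ih => intro b; exact le_trans (ih (g b x)) (hg b x)

theorem pv_foldl_le_of_mem {α : Type} (g : Nat → α → Nat) (hg : ∀ b x, g b x ≤ b)
    (L : List α) (x : α) (hx : x ∈ L) (B : Nat) (hB : ∀ b, g b x ≤ B) (b : Nat) :
    List.foldl g b L ≤ B := by
  obtain ⟨l1, l2, rfl⟩ := List.mem_iff_append.mp hx
  rw [List.foldl_append, List.foldl_cons]
  exact le_trans (pv_foldl_le_init g hg l2 _) (hB _)

theorem pv_le_foldl {α : Type} (g : Nat → α → Nat) (p : Nat) :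
    ∀ (L : List α) (b : Nat), (∀ b x, x ∈ L → p ≤ b → p ≤ g b x) → p ≤ b → p ≤ List.foldl g b L := by
  intro L
  induction L with
  | nil => intro b _ hb; simpa using hb
  | cons x L ih =>
      intro b hg hb
      exact ih (g b x) (fun b' y hy => hg b' y (List.mem_cons_of_mem x hy))
        (hg b x List.mem_cons_self hb)

def pvInner (sid : List Char) (b : Nat) (i : Int) : Nat :=
  pvKeywordPriority.foldl
    (fun b kp =>
      if PySem.Chars.startswith (sid.drop i.toNat) kp.1.toList then min b kp.2 else b)
    b

theorem pvInner_le (sid : List Char) : ∀ (b : Nat) (i : Int), pvInner sid b i ≤ b := by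
  intro b i
  exact pv_foldl_le_init _ (by intro b kp; split <;> simp) _ _

def pvBest (sid : List Char) : Nat :=
  (PySem.List.pyRange 0 (sid.length : Int) 1).foldl (pvInner sid) 4

theorem pvBest_le (sid : List Char) : pvBest sid ≤ 4 :=
  pv_foldl_le_init _ (pvInner_le sid) _ _

theorem pv_keywords_nonempty : ∀ kp ∈ pvKeywordPriority, kp.1.toList ≠ [] := by decide

-- upper bound: a matched keyword of priority p forces best ≤ p
theorem pvBest_le_of_M (sid : List Char) (p : Nat) (h : pvM sid p) : pvBest sid ≤ p := by
  obtain ⟨kp, hkp, hp, i, hpre⟩ := h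
  have hne : kp.1.toList ≠ [] := pv_keywords_nonempty kp hkp
  have hi : i < sid.length := by
    by_contra hge
    push Not at hge
    rw [List.drop_eq_nil_of_le hge] at hpre
    exact hne (List.prefix_nil.mp hpre)
  have hmem : (i : Int) ∈ PySem.List.pyRange 0 (sid.length : Int) 1 := by
    rw [PySem.List.mem_pyRange_one]
    constructor <;> [positivity; exact_mod_cast hi]
  unfold pvBest
  refine pv_foldl_le_of_mem (pvInner sid) (pvInner_le sid) _ _ hmem p ?_ 4
  intro b
  unfold pvInner
  refine pv_foldl_le_of_mem
    (fun b kp => if PySem.Chars.startswith (sid.drop ((i : Int)).toNat) kp.1.toList then min b kp.2 else b)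
    (fun b kp => by dsimp only; split <;> simp) _ kp hkp p ?_ b
  intro b'
  have hsw : PySem.Chars.startswith (sid.drop ((i : Int)).toNat) kp.1.toList = true := by
    rw [PySem.Chars.startswith_iff, Int.toNat_natCast]
    exact hpre
  dsimp only
  rw [hsw]
  simp [hp]

-- lower bound: if nothing of priority < p matches anywhere, best ≥ p
theorem pv_le_pvBest (sid : List Char) (p : Nat) (hp4 : p ≤ 4)
    (h : ∀ q < p, ¬ pvM sid q) : p ≤ pvBest sid := by
  refine pv_le_foldl (pvInner sid) p _ _ ?_ hp4
  intro b i _ hb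
  refine pv_le_foldl _ p _ _ ?_ hb
  intro b' kp hkp hb'
  by_cases hs : PySem.Chars.startswith (sid.drop i.toNat) kp.1.toList = true
  · rw [hs]
    have hMpri : pvM sid kp.2 := ⟨kp, hkp, rfl, i.toNat, (PySem.Chars.startswith_iff _ _).mp hs⟩
    have : p ≤ kp.2 := by
      by_contra hlt
      push Not at hlt
      exact h kp.2 hlt hMpri
    exact le_min hb' this
  · simp only [Bool.not_eq_true] at hs
    rw [hs]
    exact hb'

-- bridge: A's any-checks are exactly pvM at priorities 0..3
theorem pv_any_iff_M (s : String) (p : Nat) (ks : List String)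
    (hks : ∀ k ∈ ks, (k, p) ∈ pvKeywordPriority)
    (honly : ∀ kp ∈ pvKeywordPriority, kp.2 = p → kp.1 ∈ ks) :
    (ks.any (fun k => PySem.Str.isIn k s) = true) ↔ pvM s.toList p := by
  constructor
  · intro h
    obtain ⟨k, hk, hin⟩ := List.any_eq_true.mp h
    refine ⟨(k, p), hks k hk, rfl, ?_⟩
    have := (PySem.Chars.exists_prefix_drop_iff_isIn k.toList s.toList).mpr (by simpa using hin)
    exact this
  · rintro ⟨kp, hkp, hp, i, hpre⟩
    refine List.any_eq_true.mpr ⟨kp.1, honly kp hkp hp, ?_⟩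
    have : PySem.Chars.isIn kp.1.toList s.toList = true :=
      (PySem.Chars.exists_prefix_drop_iff_isIn _ _).mp ⟨i, hpre⟩
    simpa using this

-- putting it together: A's if/elif chain equals the section table indexed by the scanned minimum
theorem pv_sections_eq (s : String) :
    (if (["ui", "gradio", "streamlit", "component"].any (fun k => PySem.Str.isIn k s)) then
      "UI Standards"
    else if (["api", "endpoint", "validation", "schema"].any (fun k => PySem.Str.isIn k s)) then
      "API Standards"
    else if (["db", "database", "transaction", "migration"].any (fun k => PySem.Str.isIn k s)) then
      "Database Standards"
    else if (["test", "doc", "documentation"].any (fun k => PySem.Str.isIn k s)) then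
      "Testing & Documentation"
    else
      "Core Implementation Standards")
    = pvSections.getD (pvBest s.toList) "Core Implementation Standards" := by
  have h0 := pv_any_iff_M s 0 ["ui", "gradio", "streamlit", "component"] (by decide) (by decide)
  have h1 := pv_any_iff_M s 1 ["api", "endpoint", "validation", "schema"] (by decide) (by decide)
  have h2 := pv_any_iff_M s 2 ["db", "database", "transaction", "migration"] (by decide) (by decide)
  have h3 := pv_any_iff_M s 3 ["test", "doc", "documentation"] (by decide) (by decide)
  by_cases c0 : (["ui", "gradio", "streamlit", "component"].any (fun k => PySem.Str.isIn k s)) = true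
  · rw [if_pos c0]
    have hb : pvBest s.toList = 0 := Nat.le_zero.mp (pvBest_le_of_M _ 0 (h0.mp c0))
    rw [hb]; rfl
  · rw [if_neg c0]
    by_cases c1 : (["api", "endpoint", "validation", "schema"].any (fun k => PySem.Str.isIn k s)) = true
    · rw [if_pos c1]
      have hub := pvBest_le_of_M _ 1 (h1.mp c1)
      have hlb := pv_le_pvBest s.toList 1 (by omega) (by
        intro q hq hM
        interval_cases q
        · exact c0 (h0.mpr hM))
      have hb : pvBest s.toList = 1 := le_antisymm hub hlb
      rw [hb]; rfl
    · rw [if_neg c1]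
      by_cases c2 : (["db", "database", "transaction", "migration"].any (fun k => PySem.Str.isIn k s)) = true
      · rw [if_pos c2]
        have hub := pvBest_le_of_M _ 2 (h2.mp c2)
        have hlb := pv_le_pvBest s.toList 2 (by omega) (by
          intro q hq hM
          interval_cases q
          · exact c0 (h0.mpr hM)
          · exact c1 (h1.mpr hM))
        have hb : pvBest s.toList = 2 := le_antisymm hub hlb
        rw [hb]; rfl
      · rw [if_neg c2]
        by_cases c3 : (["test", "doc", "documentation"].any (fun k => PySem.Str.isIn k s)) = true
        · rw [if_pos c3]
          have hub := pvBest_le_of_M _ 3 (h3.mp c3)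
          have hlb := pv_le_pvBest s.toList 3 (by omega) (by
            intro q hq hM
            interval_cases q
            · exact c0 (h0.mpr hM)
            · exact c1 (h1.mpr hM)
            · exact c2 (h2.mpr hM))
          have hb : pvBest s.toList = 3 := le_antisymm hub hlb
          rw [hb]; rfl
        · rw [if_neg c3]
          have hlb := pv_le_pvBest s.toList 4 (by omega) (by
            intro q hq hM
            interval_cases q
            · exact c0 (h0.mpr hM)
            · exact c1 (h1.mpr hM)
            · exact c2 (h2.mpr hM)
            · exact c3 (h3.mpr hM))
          have hb : pvBest s.toList = 4 := le_antisymm (pvBest_le s.toList) hlb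
          rw [hb]; rfl

-- ===== VERDICT (by name: the statement is the Claim_ definition above) =====
theorem determine_section_py_spec : Claim_equal_determine_section_py := by
  intro standard_id _
  unfold Spec_determine_section_py determine_section_py determine_section_py_alt
  exact pv_sections_eq (PySem.Str.lower standard_id)
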